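-- pv_equiv track=rewrite | github.com/soseazi/NeuralSP-c2s | gpsr_parser_case1.py | find_predefined_idx
-- ===== SOURCE A (Python) =====
-- def find_predefined_idx(dic):
--     idx = None
--     for k in dic:
--         if k.startswith('PREDEF'):
--             idx = k.replace('PREDEF','')
--         elif k.startswith('WHATTOSAY'):
--             idx = k.replace('WHATTOSAY','')
--     return idx
-- ===== SOURCE B (Python) =====
-- def find_predefined_idx(dic):
--     for k in reversed(list(dic)):
--         if k.startswith('PREDEF'):
--             return k.replace('PREDEF', '')
--         elif k.startswith('WHATTOSAY'):
--             return k.replace('WHATTOSAY', '')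
--     return None
-- ===== Notes on version B (the rewrite author's own statement) =====
-- stated objective: alternative
-- what changed: B scans the keys in reverse and returns on the first PREDEF/WHATTOSAY match instead of A's forward keep-last accumulator scan; same O(n) cost, but B stops early.
import Mathlib
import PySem

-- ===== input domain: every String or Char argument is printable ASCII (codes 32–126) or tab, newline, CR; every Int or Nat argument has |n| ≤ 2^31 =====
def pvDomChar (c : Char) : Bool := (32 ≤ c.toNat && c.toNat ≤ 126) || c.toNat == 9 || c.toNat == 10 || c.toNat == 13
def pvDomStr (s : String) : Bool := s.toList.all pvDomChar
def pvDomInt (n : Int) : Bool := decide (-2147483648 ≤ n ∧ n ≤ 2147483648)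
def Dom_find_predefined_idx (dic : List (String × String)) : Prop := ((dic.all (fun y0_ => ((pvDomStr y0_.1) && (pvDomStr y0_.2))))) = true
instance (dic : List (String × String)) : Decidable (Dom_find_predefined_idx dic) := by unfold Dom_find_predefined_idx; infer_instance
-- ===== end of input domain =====

-- B scans the keys in reverse and returns on the first PREDEF/WHATTOSAY match instead of A's forward keep-last accumulator; same result, same O(n) cost.


-- ===== PORT A =====
-- forward scan, keep-last accumulator (literal port of A's loop)
def find_predefined_idx (dic : List (String × String)) : Option String :=
  dic.foldl (fun idx kv =>
    if PySem.Str.startswith kv.1 "PREDEF" then some (PySem.Str.replace kv.1 "PREDEF" "")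
    else if PySem.Str.startswith kv.1 "WHATTOSAY" then some (PySem.Str.replace kv.1 "WHATTOSAY" "")
    else idx) none

-- ===== PORT B =====
-- early-return search over the reversed key list (literal port of B's loop)
def pvFindRev : List (String × String) → Option String
  | [] => none
  | kv :: rest =>
    if PySem.Str.startswith kv.1 "PREDEF" then some (PySem.Str.replace kv.1 "PREDEF" "")
    else if PySem.Str.startswith kv.1 "WHATTOSAY" then some (PySem.Str.replace kv.1 "WHATTOSAY" "")
    else pvFindRev rest

def find_predefined_idx_alt (dic : List (String × String)) : Option String :=
  pvFindRev dic.reverse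

-- ===== PRECONDITION & SPEC =====
def Spec_find_predefined_idx (dic : List (String × String)) (out : Option String) : Prop := out = find_predefined_idx_alt dic
instance (dic : List (String × String)) (out : Option String) : Decidable (Spec_find_predefined_idx dic out) := by unfold Spec_find_predefined_idx; infer_instance

-- ===== CLAIM (what is proved, stated in full; the proofs are below) =====
def Claim_equal_find_predefined_idx : Prop := ∀ (dic : List (String × String)), Dom_find_predefined_idx dic → Spec_find_predefined_idx dic (find_predefined_idx dic)

-- ===== LEMMAS AND PROOFS =====
theorem pvFoldl_eq_rev (l : List (String × String)) (acc : Option String) :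
    l.foldl (fun idx kv =>
      if PySem.Str.startswith kv.1 "PREDEF" then some (PySem.Str.replace kv.1 "PREDEF" "")
      else if PySem.Str.startswith kv.1 "WHATTOSAY" then some (PySem.Str.replace kv.1 "WHATTOSAY" "")
      else idx) acc = (pvFindRev l.reverse).elim acc some := by
  induction l using List.reverseRecOn generalizing acc with
  | nil => simp [pvFindRev]
  | append_singleton xs kv ih =>
    rw [List.foldl_append, List.foldl_cons, List.foldl_nil, List.reverse_append,
      List.reverse_singleton, List.singleton_append, pvFindRev]
    split_ifs with h1 h2
    · rfl
    · rfl
    · exact ih acc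

-- ===== VERDICT (by name: the statement is the Claim_ definition above) =====
theorem find_predefined_idx_spec : Claim_equal_find_predefined_idx := by
  intro dic _
  unfold Spec_find_predefined_idx find_predefined_idx find_predefined_idx_alt
  rw [pvFoldl_eq_rev]
  cases pvFindRev dic.reverse <;> rfl
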